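-- pv_equiv track=rewrite | github.com/KotisKotlyandii/lessons1 | ege22/75.py | f
-- ===== SOURCE A (Python) =====
-- def f(x):
--     a,b = 0,0
--     while x > 0:
--         a += 1
--         if x % 2 == 0:
--             b += x % 10
--         x //= 10
--     return a,b
-- ===== SOURCE B (Python) =====
-- def f(x):
--     # digit count and sum of even digits, via the decimal string representation
--     if x <= 0:
--         return 0, 0
--     s = str(x)
--     return len(s), sum(int(d) for d in s if int(d) % 2 == 0)
-- ===== Notes on version B (the rewrite author's own statement) =====
-- stated objective: idiomatic
-- what changed: B replaces the while-loop of repeated modulus/division by ten with the decimal string representation: the digit count is the string's length and the even-digit sum is a comprehension over its digit characters, testing each digit's own parity instead of the parity of the truncated number.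
import Mathlib
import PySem

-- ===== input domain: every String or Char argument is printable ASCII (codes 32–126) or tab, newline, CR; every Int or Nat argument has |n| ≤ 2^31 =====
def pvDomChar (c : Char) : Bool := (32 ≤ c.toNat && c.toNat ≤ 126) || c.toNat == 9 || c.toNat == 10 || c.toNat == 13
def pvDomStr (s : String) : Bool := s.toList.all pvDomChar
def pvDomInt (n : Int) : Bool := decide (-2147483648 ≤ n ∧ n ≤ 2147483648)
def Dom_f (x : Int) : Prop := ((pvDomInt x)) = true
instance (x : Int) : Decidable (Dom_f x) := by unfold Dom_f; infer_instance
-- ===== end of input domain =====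

-- B computes the same (digit count, even-digit sum) from the decimal string
-- representation instead of A's %10 // 10 loop (objective: idiomatic).

-- ===== PORT A =====
-- the while loop of A, with accumulators a (digit count) and b (even sum)
def fLoop (x a b : Int) : Int × Int :=
  if 0 < x then
    fLoop (PySem.Int.floordiv x 10) (a + 1)
      (if PySem.Int.mod x 2 = 0 then b + PySem.Int.mod x 10 else b)
  else (a, b)
termination_by x.toNat
decreasing_by
  rw [PySem.Int.floordiv_eq_ediv_of_pos (by norm_num)]
  omega

def f (x : Int) : Int × Int := fLoop x 0 0

-- ===== PORT B =====
-- int(d) for a single decimal-digit character (exact on '0'..'9')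
def pvDigitVal (d : Char) : Int := (d.toNat : Int) - 48

def f_alt (x : Int) : Int × Int :=
  if x ≤ 0 then (0, 0)
  else
    let s := PySem.Int.toChars x
    (PySem.List.len s,
     ((s.filter (fun d => PySem.Int.mod (pvDigitVal d) 2 = 0)).map pvDigitVal).sum)

-- ===== PRECONDITION & SPEC =====
def Spec_f (x : Int) (out : Int × Int) : Prop := out = f_alt x
instance (x : Int) (out : Int × Int) : Decidable (Spec_f x out) := by unfold Spec_f; infer_instance

-- ===== CLAIM (what is proved, stated in full; the proofs are below) =====
def Claim_equal_f : Prop := ∀ (x : Int), Dom_f x → Spec_f x (f x)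

-- ===== LEMMAS AND PROOFS =====

-- toDigitsCore accumulator lemma
lemma pvTdcAcc (b : Nat) : ∀ (fu n : Nat) (l : List Char),
    Nat.toDigitsCore b fu n l = Nat.toDigitsCore b fu n [] ++ l := by
  intro fu
  induction fu with
  | zero => intro n l; simp [Nat.toDigitsCore]
  | succ fu ih =>
    intro n l
    simp only [Nat.toDigitsCore]
    by_cases h : n / b = 0
    · simp [h]
    · simp only [h, if_false]
      rw [ih (n / b) (Nat.digitChar (n % b) :: l), ih (n / b) [Nat.digitChar (n % b)]]
      simp

-- toDigitsCore is fuel-independent once the fuel exceeds n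
lemma pvTdcFuel (b : Nat) (hb : 2 ≤ b) : ∀ (f1 : Nat), ∀ (f2 n : Nat), n < f1 → n < f2 →
    Nat.toDigitsCore b f1 n [] = Nat.toDigitsCore b f2 n [] := by
  intro f1
  induction f1 with
  | zero => intro f2 n h1 _; omega
  | succ f1 ih =>
    intro f2 n h1 h2
    cases f2 with
    | zero => omega
    | succ f2 =>
      simp only [Nat.toDigitsCore]
      by_cases h : n / b = 0
      · simp [h]
      · simp only [h, if_false]
        have hn : 0 < n := by
          rcases Nat.eq_zero_or_pos n with h0 | h0
          · simp [h0] at h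
          · exact h0
        have hlt : n / b < n := Nat.div_lt_self hn (by omega)
        rw [pvTdcAcc, pvTdcAcc b f2, ih f2 (n / b) (by omega) (by omega)]

-- peeling the last decimal digit off Nat.toDigits
lemma pvToDigits_step (n : Nat) (hn : 10 ≤ n) :
    Nat.toDigits 10 n = Nat.toDigits 10 (n / 10) ++ [Nat.digitChar (n % 10)] := by
  have h : n / 10 ≠ 0 := by omega
  have L : Nat.toDigits 10 n = Nat.toDigitsCore 10 n (n / 10) [Nat.digitChar (n % 10)] := by
    simp only [Nat.toDigits, Nat.toDigitsCore]
    rw [if_neg h]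
  rw [L, pvTdcAcc, pvTdcFuel 10 (by omega) n (n / 10 + 1) (n / 10)
    (Nat.lt_of_lt_of_le (Nat.div_lt_self (by omega) (by omega)) (by omega)) (by omega)]
  rfl

lemma pvToDigits_small (n : Nat) (h1 : 0 < n) (h2 : n < 10) :
    Nat.toDigits 10 n = [Nat.digitChar n] := by
  have h : n / 10 = 0 := by omega
  simp [Nat.toDigits, Nat.toDigitsCore, h, Nat.mod_eq_of_lt h2]

lemma pvDigitVal_digitChar (d : Nat) (hd : d < 10) :
    pvDigitVal (Nat.digitChar d) = (d : Int) := by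
  interval_cases d <;> decide

-- the even-digit sum of B, as a function of the digit-character list
def pvESum (l : List Char) : Int :=
  ((l.filter (fun d => PySem.Int.mod (pvDigitVal d) 2 = 0)).map pvDigitVal).sum

lemma pvESum_append (l : List Char) (c : Char) :
    pvESum (l ++ [c]) =
      pvESum l + (if PySem.Int.mod (pvDigitVal c) 2 = 0 then pvDigitVal c else 0) := by
  simp only [pvESum, List.filter_append, List.map_append, List.sum_append,
    List.filter_cons, List.filter_nil]
  by_cases h : PySem.Int.mod (pvDigitVal c) 2 = 0
  · rw [if_pos (by simpa using h), if_pos h]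
    simp
  · rw [if_neg (by simpa using h), if_neg h]
    simp

lemma pvMod_digit (d : Nat) (hd : d < 10) :
    PySem.Int.mod (pvDigitVal (Nat.digitChar d)) 2 = ((d % 2 : Nat) : Int) := by
  interval_cases d <;> decide

-- main loop invariant: fLoop on a positive natural adds the digit count and even sum
lemma pvLoop_spec : ∀ (n : Nat), 0 < n → ∀ (a b : Int),
    fLoop (n : Int) a b =
      (a + ((Nat.toDigits 10 n).length : Int), b + pvESum (Nat.toDigits 10 n)) := by
  intro n
  induction n using Nat.strong_induction_on with
  | _ n ih =>
    intro hn a b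
    rw [fLoop]
    have hpos : (0 : Int) < (n : Int) := by exact_mod_cast hn
    rw [if_pos hpos]
    have hfd : PySem.Int.floordiv (n : Int) 10 = ((n / 10 : Nat) : Int) := by
      exact_mod_cast PySem.Int.floordiv_natCast n 10
    have hm2 : PySem.Int.mod (n : Int) 2 = ((n % 2 : Nat) : Int) := by
      exact_mod_cast PySem.Int.mod_natCast n 2
    have hm10 : PySem.Int.mod (n : Int) 10 = ((n % 10 : Nat) : Int) := by
      exact_mod_cast PySem.Int.mod_natCast n 10
    rw [hfd, hm2, hm10]
    by_cases hbig : 10 ≤ n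
    · have hrec := ih (n / 10) (Nat.div_lt_self hn (by omega)) (by omega)
      rw [hrec]
      rw [pvToDigits_step n hbig, pvESum_append, List.length_append]
      have hdlt : n % 10 < 10 := Nat.mod_lt n (by omega)
      rw [pvMod_digit _ hdlt, pvDigitVal_digitChar _ hdlt]
      have hpar : n % 10 % 2 = n % 2 := by omega
      rw [hpar]
      rw [Prod.mk.injEq]
      refine ⟨by push_cast [List.length_singleton]; ring, ?_⟩
      by_cases hev : n % 2 = 0
      · have h1 : ((n % 2 : Nat) : Int) = 0 := by exact_mod_cast hev
        rw [if_pos h1, if_pos h1]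
        ring
      · have h1 : ¬ ((n % 2 : Nat) : Int) = 0 := by exact_mod_cast hev
        rw [if_neg h1, if_neg h1]
        ring
    · -- 0 < n < 10: one iteration then the loop stops
      rw [fLoop]
      have h0 : n / 10 = 0 := by omega
      have hstop : ¬ (0 : Int) < ((n / 10 : Nat) : Int) := by simp [h0]
      rw [if_neg hstop]
      rw [pvToDigits_small n hn (by omega)]
      have hmod : n % 10 = n := Nat.mod_eq_of_lt (by omega)
      rw [hmod]
      simp only [pvESum, List.filter_cons, List.filter_nil]
      rw [pvMod_digit n (by omega)]
      by_cases hev : n % 2 = 0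
      · have h1 : ((n % 2 : Nat) : Int) = 0 := by exact_mod_cast hev
        rw [if_pos h1, if_pos (by simpa using h1)]
        simp [pvDigitVal_digitChar n (by omega)]
      · have h1 : ¬ ((n % 2 : Nat) : Int) = 0 := by exact_mod_cast hev
        rw [if_neg h1, if_neg (by simpa using h1)]
        simp

-- ===== VERDICT (by name: the statement is the Claim_ definition above) =====
theorem f_spec : Claim_equal_f := by
  intro x _
  unfold Spec_f f f_alt
  by_cases hx : x ≤ 0
  · rw [fLoop]
    have h0 : ¬ (0 : Int) < x := by omega
    rw [if_neg h0, if_pos hx]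
  · have hx' : 0 < x := by omega
    have hn : x = ((x.toNat : Nat) : Int) := by omega
    have hpos : 0 < x.toNat := by omega
    rw [hn, pvLoop_spec x.toNat hpos 0 0]
    have hneg : ¬ ((x.toNat : Int) ≤ 0) := by omega
    simp only [hneg, if_false]
    have hchars : PySem.Int.toChars ((x.toNat : Nat) : Int) = Nat.toDigits 10 x.toNat := by
      rw [PySem.Int.toChars, if_neg (by omega : ¬ (((x.toNat : Nat) : Int) < 0))]
      rw [Int.toNat_natCast]
    rw [hchars]
    simp [PySem.List.len_eq, pvESum]
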